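-- pv_equiv track=rewrite | github.com/laportagm/NeuroVis-Repo | syntax_fix_backup_20250607_180025/fix_godot4_syntax_comprehensive.py | fix_tool_syntax
-- ===== SOURCE A (Python) =====
-- from typing import List, Dict, Tuple
--
-- def fix_tool_syntax(content: str) -> Tuple[str, int]:
--     """Fix tool -> @tool"""
--     fixes = 0
--     lines = content.split('\n')
--
--     for i, line in enumerate(lines):
--         stripped = line.strip()
--         if stripped == 'tool':
--             # Replace with @tool
--             indent = line[:len(line) - len(line.lstrip())]
--             lines[i] = f'{indent}@tool'
--             fixes += 1
--
--     return '\n'.join(lines), fixes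
-- ===== SOURCE B (Python) =====
-- def fix_tool_syntax(content):
--     """Fix tool -> @tool (single character-level pass, no split/strip)."""
--     out = []
--     fixes = 0
--     buf = []    # characters of the current line
--     lead = 0    # length of the line's leading whitespace
--     state = 0   # 0: still in indent; 1-4: that many chars of 'tool' matched; 5: trailing ws after 'tool'; -1: cannot match
--
--     def is_ws(ch):
--         return ch.isspace() and ch != '\n'
--
--     def flush():
--         nonlocal fixes
--         if state >= 4:
--             out.append(''.join(buf[:lead]) + '@tool')
--             fixes += 1
--         else:
--             out.append(''.join(buf))
--
--     for ch in content:
--         if ch == '\n':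
--             flush()
--             buf = []
--             lead = 0
--             state = 0
--         else:
--             buf.append(ch)
--             if state == -1:
--                 pass
--             elif state == 0 and is_ws(ch):
--                 lead += 1
--             elif state < 4 and ch == 'tool'[state]:
--                 state += 1
--             elif state >= 4 and is_ws(ch):
--                 state = 5
--             else:
--                 state = -1
--     flush()
--     return '\n'.join(out), fixes
-- ===== Notes on version B (the rewrite author's own statement) =====
-- stated objective: alternative
-- what changed: A splits the content into lines and re-scans each line several times (strip, lstrip, slicing, join); B makes a single character-level pass over the string with a small state machine tracking the leading-whitespace length and how much of the target keyword has been matched, emitting fixed lines as it goes.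
import Mathlib
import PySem

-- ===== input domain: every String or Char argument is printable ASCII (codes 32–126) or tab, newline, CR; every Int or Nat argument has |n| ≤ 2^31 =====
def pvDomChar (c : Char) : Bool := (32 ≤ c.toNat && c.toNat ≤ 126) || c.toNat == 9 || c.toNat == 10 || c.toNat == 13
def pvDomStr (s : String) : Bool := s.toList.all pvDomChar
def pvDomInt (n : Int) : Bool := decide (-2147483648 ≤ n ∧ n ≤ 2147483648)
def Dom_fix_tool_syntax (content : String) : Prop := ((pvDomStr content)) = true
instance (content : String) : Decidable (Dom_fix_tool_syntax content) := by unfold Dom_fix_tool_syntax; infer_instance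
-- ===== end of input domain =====

-- B replaces A's split('\n')/strip()/lstrip() multi-pass line loop by a single character-level
-- state-machine pass over the string (objective: alternative, same asymptotic cost).

-- ===== PORT A =====
-- the loop body of A ('for i, line in enumerate(lines): …'); p.1 comes from enumerate starting
-- at 0, hence 0 ≤ p.1 and '.toNat' is exact (Python assigns lines[i] at a valid index)
def fixAStep (st : List (List Char) × Int) (p : Int × List Char) : List (List Char) × Int :=
  let line := p.2
  let stripped := PySem.Chars.strip line
  if stripped = "tool".toList then
    let indent := PySem.Chars.slice line none (some ((line.length : Int) - ((PySem.Chars.lstrip line).length : Int)))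
    (st.1.set p.1.toNat (indent ++ "@tool".toList), st.2 + 1)
  else st

def fix_tool_syntax (content : String) : String × Int :=
  let lines := PySem.Chars.splitOn content.toList ['\n']
  let r := (PySem.List.enumerate lines 0).foldl fixAStep (lines, (0 : Int))
  (String.ofList (PySem.Chars.join ['\n'] r.1), r.2)

-- ===== PORT B =====
-- is_ws(ch) = ch.isspace() and ch != '\n'
def pvIsWs (ch : Char) : Bool := PySem.Chars.isspace ch && !(ch == '\n')

-- the machine state: finished lines, fix count, current line, its leading-ws length, match state
structure PvSt where
  out : List (List Char)
  fixes : Int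
  buf : List Char
  lead : Nat
  state : Int

-- flush(): emit the current line (buf[:lead] is a slice at a nonnegative length: List.take)
def pvFlush (s : PvSt) : List (List Char) × Int :=
  if 4 ≤ s.state then (s.out ++ [s.buf.take s.lead ++ "@tool".toList], s.fixes + 1)
  else (s.out ++ [s.buf], s.fixes)

-- one character of B's loop; 'tool'[state] is read at 0 ≤ state < 4 via pyGet?
def pvStep (s : PvSt) (ch : Char) : PvSt :=
  if ch == '\n' then
    let of := pvFlush s
    ⟨of.1, of.2, [], 0, 0⟩
  else
    let buf := s.buf ++ [ch]
    if s.state = -1 then ⟨s.out, s.fixes, buf, s.lead, s.state⟩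
    else if s.state = 0 ∧ pvIsWs ch then ⟨s.out, s.fixes, buf, s.lead + 1, s.state⟩
    else if s.state < 4 ∧ some ch = PySem.List.pyGet? "tool".toList s.state then ⟨s.out, s.fixes, buf, s.lead, s.state + 1⟩
    else if 4 ≤ s.state ∧ pvIsWs ch then ⟨s.out, s.fixes, buf, s.lead, 5⟩
    else ⟨s.out, s.fixes, buf, s.lead, -1⟩

def fix_tool_syntax_alt (content : String) : String × Int :=
  let fin := content.toList.foldl pvStep ⟨[], 0, [], 0, 0⟩
  let of := pvFlush fin
  (String.ofList (PySem.Chars.join ['\n'] of.1), of.2)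

-- ===== PRECONDITION & SPEC =====
def Spec_fix_tool_syntax (content : String) (out : String × Int) : Prop := out = fix_tool_syntax_alt content
instance (content : String) (out : String × Int) : Decidable (Spec_fix_tool_syntax content out) := by unfold Spec_fix_tool_syntax; infer_instance

-- ===== CLAIM (what is proved, stated in full; the proofs are below) =====
def Claim_equal_fix_tool_syntax : Prop := ∀ (content : String), Dom_fix_tool_syntax content → Spec_fix_tool_syntax content (fix_tool_syntax content)

-- ===== LEMMAS AND PROOFS =====

-- canonical per-line behaviour both ports are reduced to
def isToolB (l : List Char) : Bool := PySem.Chars.strip l == "tool".toList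
def fixLineB (l : List Char) : List Char :=
  if isToolB l then l.takeWhile PySem.Chars.isspace ++ "@tool".toList else l

-- the (lead, state) part of pvStep for a non-newline character
def updB (q : Nat × Int) (ch : Char) : Nat × Int :=
  if q.2 = -1 then q
  else if q.2 = 0 ∧ pvIsWs ch then (q.1 + 1, q.2)
  else if q.2 < 4 ∧ some ch = PySem.List.pyGet? "tool".toList q.2 then (q.1, q.2 + 1)
  else if 4 ≤ q.2 ∧ pvIsWs ch then (q.1, 5)
  else (q.1, -1)

-- final match state after the rest of a line, having matched k chars of 'tool' (pat = its rest)
def stVal (k : Nat) (pat cs : List Char) : Int :=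
  if pat <+: cs then
    (if cs.drop pat.length = [] then 4 else if (cs.drop pat.length).all pvIsWs then 5 else -1)
  else if cs <+: pat then (k : Int) + cs.length
  else -1


theorem splitOn_go_eq (fuel : Nat) : ∀ (l cur : List Char) (accs : List (List Char)),
    l.length ≤ fuel →
    PySem.Chars.splitOn.go ['\n'] fuel l cur accs =
      accs.reverse ++ (l.splitOnP (· == '\n')).modifyHead (cur.reverse ++ ·) := by
  induction fuel with
  | zero =>
    intro l cur accs h
    have : l = [] := List.length_eq_zero_iff.mp (Nat.le_zero.mp h)
    subst this
    simp [PySem.Chars.splitOn.go, List.splitOnP_nil]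
  | succ n ih =>
    intro l cur accs h
    cases l with
    | nil => simp [PySem.Chars.splitOn.go, List.splitOnP_nil]
    | cons c rest =>
      rw [PySem.Chars.splitOn.go]
      simp only [List.isPrefixOf, List.splitOnP_cons]
      by_cases hc : c = '\n'
      · subst hc
        simp only [beq_self_eq_true, Bool.true_and, if_pos]
        rw [ih _ _ _ (by simpa using Nat.le_of_succ_le_succ h)]
        simp
        cases hsp : rest.splitOnP (· == '\n') with
        | nil => simp
        | cons a as => simp
      · have hb : ('\n' == c) = false := by simp [beq_iff_eq]; exact fun e => hc e.symm
        have hb' : (c == '\n') = false := by simp [beq_iff_eq, hc]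
        simp only [hb, hb', Bool.false_and, Bool.false_eq_true, if_false]
        rw [ih _ _ _ (by simpa using Nat.le_of_succ_le_succ h)]
        cases hsp : rest.splitOnP (· == '\n') with
        | nil => simp
        | cons a as => simp

theorem splitOnChars (cs : List Char) :
    PySem.Chars.splitOn cs ['\n'] = cs.splitOnP (· == '\n') := by
  rw [PySem.Chars.splitOn, splitOn_go_eq _ _ _ _ (by omega)]
  cases hsp : cs.splitOnP (· == '\n') with
  | nil => simp
  | cons a as => simp

theorem splitOnP_append_cons (b cs : List Char) (h : '\n' ∉ b) :
    (b ++ '\n' :: cs).splitOnP (· == '\n') = b :: cs.splitOnP (· == '\n') := by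
  induction b with
  | nil => simp [List.splitOnP_cons]
  | cons x b ih =>
    have hx : (x == '\n') = false := by simp [beq_iff_eq]; intro e; exact h (e ▸ List.mem_cons_self ..)
    simp only [List.cons_append, List.splitOnP_cons, hx, Bool.false_eq_true, if_false]
    rw [ih (fun m => h (List.mem_cons_of_mem _ m))]
    rfl

theorem splitOnP_no_nl (b : List Char) (h : '\n' ∉ b) :
    b.splitOnP (· == '\n') = [b] := by
  induction b with
  | nil => simp [List.splitOnP_nil]
  | cons x b ih =>
    have hx : (x == '\n') = false := by simp [beq_iff_eq]; intro e; exact h (e ▸ List.mem_cons_self ..)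
    simp only [List.splitOnP_cons, hx, Bool.false_eq_true, if_false]
    rw [ih (fun m => h (List.mem_cons_of_mem _ m))]
    rfl

theorem indent_eq (l : List Char) :
    PySem.Chars.slice l none (some ((l.length : Int) - ((PySem.Chars.lstrip l).length : Int)))
      = l.takeWhile PySem.Chars.isspace := by
  have hlen : (l.takeWhile PySem.Chars.isspace).length + (PySem.Chars.lstrip l).length = l.length := by
    rw [PySem.Chars.lstrip, ← List.length_append,
      List.takeWhile_append_dropWhile (p := PySem.Chars.isspace) (l := l)]
  have h1 : (l.length : Int) - ((PySem.Chars.lstrip l).length : Int)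
      = ((l.takeWhile PySem.Chars.isspace).length : Int) := by omega
  rw [PySem.Chars.slice_eq_listSlice, h1, PySem.List.slice_to _ (by positivity)]
  rw [Int.toNat_natCast]
  exact ((List.prefix_iff_eq_take).mp (List.takeWhile_prefix _)).symm

theorem set_append_len (pre : List (List Char)) (l v : List Char) (rest : List (List Char)) :
    (pre ++ l :: rest).set pre.length v = pre ++ v :: rest := by
  rw [List.set_append]
  simp

theorem foldA (suf : List (List Char)) : ∀ (pre : List (List Char)) (f : Int),
    (PySem.List.enumerate suf (pre.length : Int)).foldl fixAStep (pre ++ suf, f)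
      = (pre ++ suf.map fixLineB, f + ((suf.countP isToolB : Nat) : Int)) := by
  induction suf with
  | nil => intro pre f; simp [PySem.List.enumerate]
  | cons l rest ih =>
    intro pre f
    rw [PySem.List.enumerate_cons, List.foldl_cons]
    by_cases h : PySem.Chars.strip l = "tool".toList
    · replace h : PySem.Chars.strip l = ['t', 'o', 'o', 'l'] := h
      have hstep : fixAStep (pre ++ l :: rest, f) ((pre.length : Int), l)
          = ((pre ++ [fixLineB l]) ++ rest, f + 1) := by
        simp only [fixAStep, if_pos h, Int.toNat_natCast, indent_eq]
        rw [set_append_len]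
        simp [fixLineB, isToolB, h]
      rw [hstep]
      have hlen : ((pre.length : Int) + 1) = (((pre ++ [fixLineB l]).length : Nat) : Int) := by
        simp
      rw [hlen, ih]
      simp only [List.map_cons, List.append_assoc, List.singleton_append, List.countP_cons,
        isToolB, beq_iff_eq, h, if_pos, Prod.mk.injEq, true_and]
      simp
      push_cast
      ring
    · replace h : ¬ PySem.Chars.strip l = ['t', 'o', 'o', 'l'] := h
      have hstep : fixAStep (pre ++ l :: rest, f) ((pre.length : Int), l)
          = ((pre ++ [l]) ++ rest, f) := by
        simp [fixAStep, if_neg h]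
      rw [hstep]
      have hlen : ((pre.length : Int) + 1) = (((pre ++ [l]).length : Nat) : Int) := by
        simp
      rw [hlen, ih]
      have hfix : fixLineB l = l := by simp [fixLineB, isToolB, h]
      have hc : isToolB l = false := by simp [isToolB, h]
      simp [hfix, hc]

theorem A_eq (content : String) :
    fix_tool_syntax content =
      (String.ofList (PySem.Chars.join ['\n'] ((content.toList.splitOnP (· == '\n')).map fixLineB)),
       (((content.toList.splitOnP (· == '\n')).countP isToolB : Nat) : Int)) := by
  have h := foldA (content.toList.splitOnP (· == '\n')) [] 0
  simp only [List.length_nil, Nat.cast_zero, List.nil_append, zero_add] at h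
  simp only [fix_tool_syntax, splitOnChars, h]

theorem pvStep_nl (s : PvSt) : pvStep s '\n' = ⟨(pvFlush s).1, (pvFlush s).2, [], 0, 0⟩ := by
  simp [pvStep]

theorem pvStep_ch (s : PvSt) (ch : Char) (h : ch ≠ '\n') :
    pvStep s ch = ⟨s.out, s.fixes, s.buf ++ [ch],
      (updB (s.lead, s.state) ch).1, (updB (s.lead, s.state) ch).2⟩ := by
  rw [pvStep, if_neg (by simp [h])]
  rw [updB]
  split_ifs <;> rfl

theorem M1 (cs : List Char) : ∀ (l : Nat), cs.foldl updB (l, -1) = (l, -1) := by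
  induction cs with
  | nil => intro l; rfl
  | cons c cs ih => intro l; rw [List.foldl_cons]; rw [updB]; simp; exact ih l

theorem M5 (cs : List Char) : ∀ (l : Nat),
    cs.foldl updB (l, 5) = (l, if cs.all pvIsWs then 5 else -1) := by
  induction cs with
  | nil => intro l; rfl
  | cons c cs ih =>
    intro l
    rw [List.foldl_cons]
    by_cases hw : pvIsWs c
    · have : updB (l, 5) c = (l, 5) := by rw [updB]; simp [hw]
      rw [this, ih]
      simp [hw]
    · have : updB (l, 5) c = (l, -1) := by rw [updB]; simp [hw]
      rw [this, M1]
      simp [hw]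

theorem W (cs : List Char) : ∀ (l : Nat), cs.all pvIsWs →
    cs.foldl updB (l, 0) = (l + cs.length, 0) := by
  induction cs with
  | nil => intro l _; simp
  | cons c cs ih =>
    intro l h
    simp only [List.all_cons, Bool.and_eq_true] at h
    rw [List.foldl_cons]
    have : updB (l, 0) c = (l + 1, 0) := by rw [updB]; simp [h.1]
    rw [this, ih _ h.2]
    simp
    omega

theorem MK (cs : List Char) : ∀ (l k : Nat) (pat : List Char), 1 ≤ k → k ≤ 4 →
    "tool".toList.drop k = pat →
    cs.foldl updB (l, (k : Int)) = (l, stVal k pat cs) := by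
  induction cs with
  | nil =>
    intro l k pat h1 h4 hk
    rcases pat with _ | ⟨p, pat'⟩
    · have : k = 4 := by
        have := congrArg List.length hk
        simp at this
        omega
      subst this
      simp [stVal]
    · have : ¬ ((p :: pat') <+: ([] : List Char)) := by simp
      simp [stVal, this]
  | cons c cs ih =>
    intro l k pat h1 h4 hk
    rcases pat with _ | ⟨p, pat'⟩
    · -- k = 4
      have hk4 : k = 4 := by
        have := congrArg List.length hk
        simp at this
        omega
      subst hk4
      rw [List.foldl_cons]
      by_cases hw : pvIsWs c
      · have : updB (l, ((4:Nat) : Int)) c = (l, 5) := by rw [updB]; simp [hw]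
        rw [this, M5]
        simp [stVal, hw]
      · have : updB (l, ((4:Nat) : Int)) c = (l, -1) := by rw [updB]; simp [hw]
        rw [this, M1]
        simp [stVal, hw]
    · -- k < 4, pattern head p
      have hklt : k < 4 := by
        have := congrArg List.length hk
        simp at this
        omega
      have hget : PySem.List.pyGet? "tool".toList ((k : Nat) : Int) = some p := by
        rw [PySem.List.pyGet?_natCast]
        rw [← List.head?_drop, hk]
        rfl
      rw [List.foldl_cons]
      by_cases hc : c = p
      · subst hc
        have hstep : updB (l, ((k:Nat) : Int)) c = (l, ((k:Nat) : Int) + 1) := by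
          simp only [updB]
          rw [if_neg (by omega), if_neg (by rintro ⟨e, _⟩; omega),
            if_pos ⟨by exact_mod_cast hklt, by rw [hget]⟩]
        rw [hstep]
        have hcast : ((k : Nat) : Int) + 1 = (((k + 1 : Nat)) : Int) := by push_cast; ring
        have hk' : "tool".toList.drop (k + 1) = pat' := by
          rw [← List.tail_drop, hk]
          rfl
        rw [hcast, ih _ _ _ (by omega) (by omega) hk']
        have hsv : stVal k (c :: pat') (c :: cs) = stVal (k+1) pat' cs := by
          simp only [stVal, List.cons_prefix_cons, true_and, List.length_cons, List.drop_succ_cons]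
          split_ifs <;> (try rfl) <;> (push_cast; ring)
        rw [hsv]
      · have hstep : updB (l, ((k:Nat) : Int)) c = (l, -1) := by
          rw [updB]
          simp only [updB]
          rw [if_neg (by omega), if_neg (by rintro ⟨e, _⟩; omega),
            if_neg (by rw [hget]; rintro ⟨_, e⟩; exact hc (Option.some.inj e)),
            if_neg (by rintro ⟨e, _⟩; omega)]
        rw [hstep, M1]
        have h1' : ¬ ((p :: pat') <+: (c :: cs)) := by simp [List.cons_prefix_cons]; intro e; exact absurd e.symm hc
        have h2' : ¬ ((c :: cs) <+: (p :: pat')) := by simp [List.cons_prefix_cons]; intro e; exact absurd e hc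
        simp [stVal, h1', h2']

theorem pvIsWs_eq (c : Char) (h : c ≠ '\n') : pvIsWs c = PySem.Chars.isspace c := by
  simp [pvIsWs, h]

theorem pvIsWs_isspace {c : Char} (h : pvIsWs c = true) : PySem.Chars.isspace c = true := by
  simp [pvIsWs] at h; exact h.1

theorem tw_congr (b : List Char) (h : '\n' ∉ b) :
    b.takeWhile pvIsWs = b.takeWhile PySem.Chars.isspace := by
  induction b with
  | nil => rfl
  | cons c b ih =>
    have hc : c ≠ '\n' := fun e => h (e ▸ List.mem_cons_self ..)
    simp only [List.takeWhile_cons, pvIsWs_eq c hc]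
    split
    · rw [ih (fun m => h (List.mem_cons_of_mem _ m))]
    · rfl

theorem dw_congr (b : List Char) (h : '\n' ∉ b) :
    b.dropWhile pvIsWs = b.dropWhile PySem.Chars.isspace := by
  induction b with
  | nil => rfl
  | cons c b ih =>
    have hc : c ≠ '\n' := fun e => h (e ▸ List.mem_cons_self ..)
    simp only [List.dropWhile_cons, pvIsWs_eq c hc]
    split
    · exact ih (fun m => h (List.mem_cons_of_mem _ m))
    · rfl

theorem dropWhile_head_false : ∀ (l : List Char) (c : Char) (r' : List Char),
    l.dropWhile pvIsWs = c :: r' → pvIsWs c = false := by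
  intro l
  induction l with
  | nil => intro c r' h; simp at h
  | cons x l ih =>
    intro c r' h
    rw [List.dropWhile_cons] at h
    split at h
    · exact ih _ _ h
    · cases h; exact Bool.eq_false_iff.mpr ‹_›

theorem rstrip_tool_iff (r : List Char) :
    PySem.Chars.rstrip r = "tool".toList ↔
      ("tool".toList <+: r ∧ (r.drop 4).all PySem.Chars.isspace) := by
  constructor
  · intro h
    have hr : r = PySem.Chars.rstrip r ++ (r.reverse.takeWhile PySem.Chars.isspace).reverse := by
      rw [PySem.Chars.rstrip]
      conv_lhs => rw [← List.reverse_reverse r,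
        ← List.takeWhile_append_dropWhile (p := PySem.Chars.isspace) (l := r.reverse),
        List.reverse_append]
    rw [h] at hr
    have hlen : "tool".toList.length = 4 := by decide
    constructor
    · exact ⟨_, hr.symm⟩
    · conv_lhs => rw [hr]
      rw [← hlen, List.drop_left]
      simp only [List.all_eq_true, List.mem_reverse]
      intro x hx
      exact List.mem_takeWhile_imp hx
  · rintro ⟨⟨t, ht⟩, hall⟩
    have ht4 : t = r.drop 4 := by
      rw [← ht]
      simp
    subst ht4
    rw [← ht, PySem.Chars.rstrip, List.reverse_append, List.dropWhile_append]
    have hdw : (r.drop 4).reverse.dropWhile PySem.Chars.isspace = [] := by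
      rw [List.dropWhile_eq_nil_iff]
      intro x hx
      simp only [List.mem_reverse] at hx
      exact (List.all_eq_true.mp hall) _ hx
    rw [hdw]
    simp [show PySem.Chars.isspace 'l' = false from by decide]

theorem stVal_ge4_iff (r' : List Char) (h' : '\n' ∉ r') :
    (4 ≤ stVal 1 ['o', 'o', 'l'] r') ↔
      (['o', 'o', 'l'] <+: r' ∧ (r'.drop 3).all PySem.Chars.isspace) := by
  have hconv : (r'.drop 3).all pvIsWs = (r'.drop 3).all PySem.Chars.isspace := by
    rw [Bool.eq_iff_iff, List.all_eq_true, List.all_eq_true]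
    constructor
    · intro h x hx; exact pvIsWs_isspace (h x hx)
    · intro h x hx
      have hxn : x ≠ '\n' := fun e => h' (e ▸ (List.drop_subset _ _ hx))
      rw [pvIsWs_eq _ hxn]; exact h x hx
  have l3 : (['o', 'o', 'l'] : List Char).length = 3 := rfl
  rw [stVal, l3]
  split_ifs with h1 h2 h3
  · constructor
    · intro _
      refine ⟨h1, ?_⟩
      rw [h2]; rfl
    · intro _; norm_num
  · rw [← hconv]
    simp [h1, h3]
  · rw [← hconv]
    simp only [h1, true_and]
    exact ⟨fun h => absurd h (by norm_num), fun h => absurd h h3⟩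
  · rename_i h4
    have hlen : r'.length < 3 := by
      have hle : r'.length ≤ 3 := by simpa using h4.length_le
      rcases Nat.lt_or_ge r'.length 3 with hlt | hge
      · exact hlt
      · exact absurd ((h4.eq_of_length (by omega)) ▸ List.prefix_refl _) h1
    constructor
    · intro h
      exfalso
      have : (4 : Int) ≤ 1 + r'.length := h
      omega
    · rintro ⟨hp, _⟩; exact absurd hp h1
  · exact ⟨fun h => absurd h (by norm_num), fun ⟨hp, _⟩ => absurd hp h1⟩

theorem strip_eq_rstrip_dw (b : List Char) (h : '\n' ∉ b) :
    PySem.Chars.strip b = PySem.Chars.rstrip (b.dropWhile pvIsWs) := by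
  rw [PySem.Chars.strip, PySem.Chars.lstrip, dw_congr b h]

theorem FLUSH (b : List Char) (o : List (List Char)) (f : Int) (h : '\n' ∉ b) :
    pvFlush ⟨o, f, b, (b.foldl updB (0, 0)).1, (b.foldl updB (0, 0)).2⟩
      = (o ++ [fixLineB b], f + if isToolB b then 1 else 0) := by
  have hwr : b.takeWhile pvIsWs ++ b.dropWhile pvIsWs = b := List.takeWhile_append_dropWhile
  have hwall : (b.takeWhile pvIsWs).all pvIsWs = true := by
    rw [List.all_eq_true]; intro x hx; exact List.mem_takeWhile_imp hx
  have hfold : b.foldl updB (0, 0) = (b.dropWhile pvIsWs).foldl updB ((b.takeWhile pvIsWs).length, 0) := by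
    conv_lhs => rw [← hwr]
    rw [List.foldl_append, W _ _ hwall]
    norm_num
  have htake : b.take (b.takeWhile pvIsWs).length = b.takeWhile PySem.Chars.isspace := by
    rw [← tw_congr b h]
    exact (List.prefix_iff_eq_take.mp (List.takeWhile_prefix _)).symm
  cases hr : b.dropWhile pvIsWs with
  | nil =>
    rw [hfold, hr]
    have hT : isToolB b = false := by
      rw [isToolB, strip_eq_rstrip_dw b h, hr]
      rfl
    rw [pvFlush]
    simp [fixLineB, hT]
  | cons c r' =>
    have hnr : '\n' ∉ c :: r' := by
      rw [← hr]
      intro m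
      exact h ((List.dropWhile_sublist _).mem m)
    have hnr' : '\n' ∉ r' := fun m => hnr (List.mem_cons_of_mem _ m)
    have hcn : c ≠ '\n' := fun e => hnr (e ▸ List.mem_cons_self ..)
    have hcw : pvIsWs c = false := dropWhile_head_false b c r' hr
    rw [hfold, hr, List.foldl_cons]
    by_cases hct : c = 't'
    · subst hct
      have hstep : updB ((b.takeWhile pvIsWs).length, 0) 't' = ((b.takeWhile pvIsWs).length, ((1:Nat) : Int)) := by
        simp only [updB]
        rw [if_neg (by omega), if_neg (by rintro ⟨_, e⟩; rw [hcw] at e; cases e),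
          if_pos ⟨by norm_num, by rfl⟩]
        norm_num
      rw [hstep, MK r' _ 1 ['o', 'o', 'l'] (by omega) (by omega) rfl]
      have hiff : (4 ≤ stVal 1 ['o', 'o', 'l'] r') ↔ isToolB b = true := by
        rw [stVal_ge4_iff r' hnr', isToolB, beq_iff_eq, strip_eq_rstrip_dw b h, hr,
          rstrip_tool_iff]
        constructor
        · rintro ⟨hp, ha⟩
          exact ⟨by rw [show ("tool".toList : List Char) = 't' :: ['o','o','l'] from rfl, List.cons_prefix_cons]; exact ⟨rfl, hp⟩, ha⟩
        · rintro ⟨hp, ha⟩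
          rw [show ("tool".toList : List Char) = 't' :: ['o','o','l'] from rfl, List.cons_prefix_cons] at hp
          exact ⟨hp.2, ha⟩
      by_cases hT : isToolB b
      · rw [pvFlush, if_pos (by exact hiff.mpr hT)]
        simp only [htake]
        simp [fixLineB, hT]
      · rw [pvFlush, if_neg (fun hc => hT (hiff.mp hc))]
        simp [fixLineB, hT]
    · have hstep : updB ((b.takeWhile pvIsWs).length, 0) c = ((b.takeWhile pvIsWs).length, -1) := by
        simp only [updB]
        rw [if_neg (by omega), if_neg (by rintro ⟨_, e⟩; rw [hcw] at e; cases e),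
          if_neg (by rintro ⟨_, e⟩; exact hct (Option.some.inj e)), if_neg (by rintro ⟨e, _⟩; omega)]
      rw [hstep, M1]
      have hT : isToolB b = false := by
        rw [isToolB, strip_eq_rstrip_dw b h, hr]
        rw [Bool.eq_false_iff]
        intro he
        rw [beq_iff_eq, rstrip_tool_iff] at he
        rcases he.1 with ⟨t, ht⟩
        rw [show ("tool".toList : List Char) = 't' :: ['o','o','l'] from rfl] at ht
        cases ht
        exact hct rfl
      rw [pvFlush, if_neg (by norm_num)]
      simp [fixLineB, hT]

theorem TOTAL (cs : List Char) : ∀ (b : List Char) (o : List (List Char)) (f : Int), '\n' ∉ b →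
    pvFlush (cs.foldl pvStep ⟨o, f, b, (b.foldl updB (0, 0)).1, (b.foldl updB (0, 0)).2⟩)
      = (o ++ ((b ++ cs).splitOnP (· == '\n')).map fixLineB,
         f + ((((b ++ cs).splitOnP (· == '\n')).countP isToolB : Nat) : Int)) := by
  induction cs with
  | nil =>
    intro b o f h
    rw [List.foldl_nil, FLUSH b o f h, List.append_nil, splitOnP_no_nl b h]
    simp [List.countP_cons]
  | cons c cs ih =>
    intro b o f h
    by_cases hc : c = '\n'
    · subst hc
      rw [List.foldl_cons, pvStep_nl, FLUSH b o f h]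
      have hinit : (0, 0) = (([] : List Char).foldl updB (0, 0)) := rfl
      have := ih [] (o ++ [fixLineB b]) (f + if isToolB b then 1 else 0) (by simp)
      simp only [List.nil_append] at this
      rw [show (⟨o ++ [fixLineB b], f + if isToolB b then 1 else 0, [], 0, 0⟩ : PvSt)
          = ⟨o ++ [fixLineB b], f + if isToolB b then 1 else 0, [],
             (([] : List Char).foldl updB (0, 0)).1, (([] : List Char).foldl updB (0, 0)).2⟩ from rfl,
        this, splitOnP_append_cons b cs h]
      simp [List.countP_cons]
      split_ifs <;> push_cast <;> ring
    · rw [List.foldl_cons, pvStep_ch _ _ hc]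
      have hupd : updB (((b.foldl updB (0, 0)).1, (b.foldl updB (0, 0)).2)) c
          = (b ++ [c]).foldl updB (0, 0) := by
        rw [List.foldl_append]
        rfl
      have hnb : '\n' ∉ b ++ [c] := by
        intro m
        rcases List.mem_append.mp m with m | m
        · exact h m
        · simp at m; exact hc m.symm
      rw [show (⟨o, f, b ++ [c],
            (updB ((b.foldl updB (0,0)).1, (b.foldl updB (0,0)).2) c).1,
            (updB ((b.foldl updB (0,0)).1, (b.foldl updB (0,0)).2) c).2⟩ : PvSt)
          = ⟨o, f, b ++ [c], ((b ++ [c]).foldl updB (0, 0)).1, ((b ++ [c]).foldl updB (0, 0)).2⟩ from by rw [hupd]]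
      rw [ih (b ++ [c]) o f hnb]
      simp

theorem B_eq (content : String) :
    fix_tool_syntax_alt content =
      (String.ofList (PySem.Chars.join ['\n'] ((content.toList.splitOnP (· == '\n')).map fixLineB)),
       (((content.toList.splitOnP (· == '\n')).countP isToolB : Nat) : Int)) := by
  have := TOTAL content.toList [] [] 0 (by simp)
  simp only [List.nil_append, zero_add] at this
  rw [fix_tool_syntax_alt]
  rw [show (⟨[], 0, [], 0, 0⟩ : PvSt)
      = ⟨[], 0, [], (([] : List Char).foldl updB (0, 0)).1, (([] : List Char).foldl updB (0, 0)).2⟩ from rfl,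
    this]

-- ===== VERDICT (by name: the statement is the Claim_ definition above) =====
theorem fix_tool_syntax_spec : Claim_equal_fix_tool_syntax := by
  intro content _
  unfold Spec_fix_tool_syntax
  rw [A_eq, B_eq]
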